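-- pv_equiv track=rewrite | github.com/borgnetzwerk/tools | src/helper.py | get_clean_title
-- ===== SOURCE A (Python) =====
-- noFileChars = '":\<>*?/'
--
-- def get_clean_title(title, eID, obsidian=False):
--     """
--     Cleans a given title to make it suitable for filenames.
--
--     Parameters:
--     title (string): The title. "episode1"
--     eID (int): The position of that episode in the playlist.
--
--     Returns:
--     string: cleaned title for use as filename
--     """
--     clean_title = title
--     for each in noFileChars:
--         clean_title = clean_title.replace(each, '')
--     if obsidian:
--         clean_title = clean_title.replace("#", '')
--     clean_title = fill_digits(eID, 3) + '_' + clean_title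
--     return clean_title
--
-- def fill_digits(var_s, cap=2):
--     """Add digits until cap is reached"""
--     var_s = str(var_s)
--     while len(var_s) < cap:
--         var_s = "0" + var_s
--     return var_s
-- ===== SOURCE B (Python) =====
-- def get_clean_title(title, eID, obsidian=False):
--     bad = set('":\<>*?/')
--     if obsidian:
--         bad.add('#')
--     cleaned = ''.join(c for c in title if c not in bad)
--     return str(eID).rjust(3, '0') + '_' + cleaned
-- ===== Notes on version B (the rewrite author's own statement) =====
-- stated objective: idiomatic
-- what changed: Replaces the seven-fold (eight with '#') repeated str.replace scans with a single filtered pass over the title using a precomputed set of disallowed characters, and replaces the while-loop zero-padding helper with str.rjust(3, '0').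
import Mathlib
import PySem

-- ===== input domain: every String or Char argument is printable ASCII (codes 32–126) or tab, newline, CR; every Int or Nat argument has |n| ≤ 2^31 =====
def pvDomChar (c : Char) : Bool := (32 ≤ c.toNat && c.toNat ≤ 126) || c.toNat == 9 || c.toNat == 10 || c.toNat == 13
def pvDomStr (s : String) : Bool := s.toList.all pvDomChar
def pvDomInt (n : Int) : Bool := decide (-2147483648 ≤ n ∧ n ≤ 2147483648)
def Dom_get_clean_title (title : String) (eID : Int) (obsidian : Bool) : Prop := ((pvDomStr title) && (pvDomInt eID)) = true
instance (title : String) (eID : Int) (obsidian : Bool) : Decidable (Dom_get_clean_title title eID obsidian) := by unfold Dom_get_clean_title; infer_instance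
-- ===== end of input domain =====

-- B cleans the title in ONE filtered pass over a precomputed set of bad characters (instead of
-- one str.replace scan per bad character) and pads the id with rjust instead of a while loop.

-- ===== PORT A =====
-- noFileChars = '":\<>*?/'  ('\<' is no escape: backslash then '<')
def pvNoFileChars : List Char := ['"', ':', '\\', '<', '>', '*', '?', '/']

-- fill_digits's while loop: prepend "0" while len < cap
def pvFillGo (cap : Nat) (s : List Char) : List Char :=
  if s.length < cap then pvFillGo cap ('0' :: s) else s
  termination_by cap - s.length

def pvFillDigits (var_s : Int) (cap : Nat) : List Char :=
  pvFillGo cap (PySem.Int.toChars var_s)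

def get_clean_title (title : String) (eID : Int) (obsidian : Bool) : String :=
  let ct := pvNoFileChars.foldl (fun ct each => PySem.Chars.replace ct [each] []) title.toList
  let ct := if obsidian then PySem.Chars.replace ct ['#'] [] else ct
  String.ofList (pvFillDigits eID 3 ++ '_' :: ct)

-- ===== PORT B =====
def get_clean_title_alt (title : String) (eID : Int) (obsidian : Bool) : String :=
  let bad : PySem.Set Char := PySem.Set.ofList ['"', ':', '\\', '<', '>', '*', '?', '/']
  let bad := if obsidian then PySem.Set.add bad '#' else bad
  let cleaned := title.toList.filter (fun c => !(PySem.Set.contains bad c))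
  let s := PySem.Int.toChars eID
  -- str(eID).rjust(3, '0')
  String.ofList ((List.replicate (3 - s.length) '0' ++ s) ++ '_' :: cleaned)

-- ===== PRECONDITION & SPEC =====
def Spec_get_clean_title (title : String) (eID : Int) (obsidian : Bool) (out : String) : Prop := out = get_clean_title_alt title eID obsidian
instance (title : String) (eID : Int) (obsidian : Bool) (out : String) : Decidable (Spec_get_clean_title title eID obsidian out) := by unfold Spec_get_clean_title; infer_instance

-- ===== CLAIM (what is proved, stated in full; the proofs are below) =====
def Claim_equal_get_clean_title : Prop := ∀ (title : String) (eID : Int) (obsidian : Bool), Dom_get_clean_title title eID obsidian → Spec_get_clean_title title eID obsidian (get_clean_title title eID obsidian)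

-- ===== LEMMAS AND PROOFS =====

-- replace.go with a single-char pattern and empty replacement is a filter
theorem pv_replace_go_filter (c : Char) : ∀ (fuel : Nat) (l acc : List Char),
    l.length ≤ fuel →
    PySem.Chars.replace.go [c] [] fuel l acc = acc.reverse ++ l.filter (fun x => x != c) := by
  intro fuel
  induction fuel with
  | zero =>
    intro l acc h
    have : l = [] := List.eq_nil_of_length_eq_zero (Nat.le_zero.mp h)
    subst this
    simp [PySem.Chars.replace.go]
  | succ n ih =>
    intro l acc h
    cases l with
    | nil => simp [PySem.Chars.replace.go]
    | cons x t =>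
      simp only [PySem.Chars.replace.go]
      have hlen : t.length ≤ n := by simpa using Nat.le_of_succ_le_succ (by simpa using h)
      by_cases hx : x = c
      · subst hx
        simp only [List.isPrefixOf, beq_self_eq_true, Bool.true_and, if_pos]
        simp only [List.length_cons, List.length_nil, Nat.zero_add, List.drop_succ_cons,
          List.drop_zero, List.reverse_nil, List.nil_append]
        rw [ih t acc hlen]
        simp
      · have hpre : [c].isPrefixOf (x :: t) = false := by
          simp [List.isPrefixOf]
          exact fun h' => absurd h'.symm hx
        rw [hpre]
        simp only [Bool.false_eq_true, if_false]
        rw [ih t (x :: acc) hlen]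
        simp [hx]

theorem pv_replace_singleton_empty (c : Char) (l : List Char) :
    PySem.Chars.replace l [c] [] = l.filter (fun x => x != c) := by
  rw [PySem.Chars.replace]
  simp only [List.isEmpty_cons, if_false, Bool.false_eq_true]
  exact pv_replace_go_filter c l.length l [] le_rfl

-- the while loop of fill_digits is a single left pad
theorem pv_fillGo_eq (cap : Nat) : ∀ (s : List Char),
    pvFillGo cap s = List.replicate (cap - s.length) '0' ++ s := by
  intro s
  fun_induction pvFillGo cap s with
  | case1 s h ih =>
    rw [ih]
    have : cap - s.length = (cap - ('0' :: s).length) + 1 := by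
      simp only [List.length_cons]; omega
    rw [this, List.replicate_succ']
    simp
  | case2 s h =>
    have : cap - s.length = 0 := by omega
    simp [this]

-- ===== VERDICT (by name: the statement is the Claim_ definition above) =====
theorem get_clean_title_spec : Claim_equal_get_clean_title := by
  intro title eID obsidian _
  unfold Spec_get_clean_title get_clean_title get_clean_title_alt pvNoFileChars pvFillDigits
  simp only [List.foldl_cons, List.foldl_nil, pv_replace_singleton_empty, pv_fillGo_eq,
    List.filter_filter]
  cases obsidian <;>
  · simp only [if_true, if_false, Bool.false_eq_true]
    congr 1
    refine congrArg _ (congrArg _ (List.filter_congr (fun c _ => ?_)))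
    have h1 : (PySem.Set.ofList ['"', ':', '\\', '<', '>', '*', '?', '/'] : List Char) =
        ['"', ':', '\\', '<', '>', '*', '?', '/'] := by decide
    first
      | (rw [h1]; simp only [PySem.Set.contains_eq_listContains, List.contains_cons,
            List.contains_nil, Bool.not_or, Bool.or_false, bne]
         ac_rfl)
      | (have h2 : PySem.Set.add (PySem.Set.ofList ['"', ':', '\\', '<', '>', '*', '?', '/']) '#' =
            ['"', ':', '\\', '<', '>', '*', '?', '/', '#'] := by decide
         rw [h2]; simp only [PySem.Set.contains_eq_listContains, List.contains_cons,
            List.contains_nil, Bool.not_or, Bool.or_false, bne]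
         ac_rfl)
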